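-- pv_equiv track=rewrite | github.com/GICSAFePhD/ACG | ACG.py | getScissorCrossing
-- ===== SOURCE A (Python) =====
-- def getScissorCrossing(network,routes):
-- 	scissorCrossingId = {}
--
-- 	for element in network:
-- 		if 'Crossing' in network[element]:
-- 			for scissorCrossing in network[element]['Crossing']:
-- 				if scissorCrossing not in scissorCrossingId:
-- 					scissorCrossingId[scissorCrossing] = {'Neighbour':[]}
--
-- 				if element not in scissorCrossingId[scissorCrossing]['Neighbour']:
-- 					scissorCrossingId[scissorCrossing]['Neighbour'].append(element)
--
-- 	for scissorCrossing in scissorCrossingId: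
-- 		for route in routes:
-- 			if scissorCrossing+'_XN' in routes[route]['ScissorCrossings']:
-- 				if 'Routes' not in scissorCrossingId[scissorCrossing]:
-- 					scissorCrossingId[scissorCrossing] |= {'Routes':[]}
-- 					scissorCrossingId[scissorCrossing] |= {'Position':[]}
-- 				if route not in scissorCrossingId[scissorCrossing]['Routes']:
-- 					scissorCrossingId[scissorCrossing]['Routes'].append(f'R{route}')
-- 					scissorCrossingId[scissorCrossing]['Position'].append(f'N')
-- 			if scissorCrossing+'_XR' in routes[route]['ScissorCrossings']:
-- 				if 'Routes' not in scissorCrossingId[scissorCrossing]: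
-- 					scissorCrossingId[scissorCrossing] |= {'Routes':[]}
-- 					scissorCrossingId[scissorCrossing] |= {'Position':[]}
-- 				if route not in scissorCrossingId[scissorCrossing]['Routes']:
-- 					scissorCrossingId[scissorCrossing]['Routes'].append(f'R{route}')
-- 					scissorCrossingId[scissorCrossing]['Position'].append(f'R')
-- 	return scissorCrossingId
-- ===== SOURCE B (Python) =====
-- def getScissorCrossing(network, routes):
--     result = {}
--     for element in network:
--         if 'Crossing' in network[element]:
--             for sc in network[element]['Crossing']:
--                 if sc not in result:
--                     result[sc] = {'Neighbour': []}
--                 if element not in result[sc]['Neighbour']: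
--                     result[sc]['Neighbour'].append(element)
--
--     for route in routes:
--         # one pass over this route's entries: strip the _XN/_XR suffix once,
--         # collecting per-crossing (hasN, hasR) flags instead of scanning the
--         # entry list for every known crossing
--         seen = {}
--         for entry in routes[route].get('ScissorCrossings', ()):
--             if entry.endswith('_XN'):
--                 base, idx = entry[:-3], 0
--             elif entry.endswith('_XR'):
--                 base, idx = entry[:-3], 1
--             else:
--                 continue
--             if base in result:
--                 seen.setdefault(base, [False, False])[idx] = True
--         rname = 'R' + route
--         for base, (hasN, hasR) in seen.items():
--             d = result[base]
--             if 'Routes' not in d: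
--                 d['Routes'] = []
--                 d['Position'] = []
--             if hasN:
--                 d['Routes'].append(rname)
--                 d['Position'].append('N')
--             if hasR:
--                 d['Routes'].append(rname)
--                 d['Position'].append('R')
--     return result
-- ===== Notes on version B (the rewrite author's own statement) =====
-- stated objective: alternative
-- what changed: A scans every route's whole ScissorCrossings list once per known crossing (crossings x routes x entries); B iterates the routes once, strips the _XN/_XR suffix of each entry in a single pass and applies the collected per-crossing flags directly.
-- intended difference: On inputs where two routes match the same crossing and the later route's name is the earlier one's name prefixed with 'R', A's dedup check (raw route name against the stored 'R'-prefixed names) silently drops the later route; B records every matching route, which is the intended behaviour. — e.g. on getScissorCrossing([("a", [("Crossing", ["c"])])], [("1", [("ScissorCrossings", ["c_XN"])]), ("R1", [("ScissorCrossings", ["c_XN"])])]): A returns [("c", [("Neighbour", ["a"]), ("Routes", ["R1"]), ("Position", ["N"])])], B returns [("c", [("Neighbour", ["a"]), ("Routes", ["R1", "RR1"]), ("Position", ["N", "N"])])]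
import Mathlib
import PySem

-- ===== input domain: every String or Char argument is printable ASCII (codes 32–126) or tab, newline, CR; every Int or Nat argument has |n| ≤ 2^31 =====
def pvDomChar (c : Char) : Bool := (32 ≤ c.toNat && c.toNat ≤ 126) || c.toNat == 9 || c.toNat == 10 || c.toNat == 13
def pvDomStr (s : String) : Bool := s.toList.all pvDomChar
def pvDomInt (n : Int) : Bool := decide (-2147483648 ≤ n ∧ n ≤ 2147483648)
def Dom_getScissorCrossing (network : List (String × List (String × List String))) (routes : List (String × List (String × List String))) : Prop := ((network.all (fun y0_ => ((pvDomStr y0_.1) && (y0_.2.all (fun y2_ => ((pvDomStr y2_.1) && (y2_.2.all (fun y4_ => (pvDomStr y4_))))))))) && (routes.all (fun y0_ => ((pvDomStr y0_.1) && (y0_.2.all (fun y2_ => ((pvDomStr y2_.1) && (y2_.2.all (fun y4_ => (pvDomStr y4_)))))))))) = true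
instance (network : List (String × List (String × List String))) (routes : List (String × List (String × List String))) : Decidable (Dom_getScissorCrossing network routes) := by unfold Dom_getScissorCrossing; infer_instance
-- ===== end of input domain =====

-- B inverts A's per-crossing × per-route × per-entry scan into one pass over each route's
-- ScissorCrossings entries (stripping the _XN/_XR suffix); return values agree outside D_.

-- ===== PORT A =====
abbrev pvInner := PySem.Dict String (List String)
abbrev pvOuter := PySem.Dict String pvInner
abbrev pvRoute := String × List (String × List String)

-- the first loop of both Pythons is textually identical; one transliteration serves both ports
-- body of the inner 'for scissorCrossing in network[element]['Crossing']' loop (x = element)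
def pvNbAdd (x : String) (acc : pvOuter) (sc : String) : pvOuter :=
  let acc := if acc.contains sc then acc else acc.insert sc (PySem.Dict.mk [("Neighbour", [])])
  let d := acc.getD sc PySem.Dict.empty
  let nb := d.getD "Neighbour" []
  if x ∈ nb then acc else acc.insert sc (d.insert "Neighbour" (nb ++ [x]))

def pvNeighbours (network : List pvRoute) : pvOuter :=
  network.foldl (fun acc e =>
    let ed : pvInner := PySem.Dict.mk e.2
    if ed.contains "Crossing" then
      (ed.getD "Crossing" []).foldl (pvNbAdd e.1) acc
    else acc) PySem.Dict.empty

-- routes[route]['ScissorCrossings']; the KeyError case is excluded by Pre_ (A) / '.get' (B)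
def pvRSC (r : pvRoute) : List String :=
  ((PySem.Dict.mk r.2).get? "ScissorCrossings").getD []

-- the duplicated append-block of A's second loop (pos is 'N' or 'R')
def pvAAdd (sc pos : String) (acc : pvOuter) (r1 : String) : pvOuter :=
  let d := acc.getD sc PySem.Dict.empty
  let d := if d.contains "Routes" then d else (d.insert "Routes" []).insert "Position" []
  let d := if r1 ∈ d.getD "Routes" [] then d
           else (d.insert "Routes" (d.getD "Routes" [] ++ ["R" ++ r1])).insert "Position" (d.getD "Position" [] ++ [pos])
  acc.insert sc d

-- body of A's 'for route in routes' loop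
def pvAStep (sc : String) (acc : pvOuter) (r : pvRoute) : pvOuter :=
  let acc := if (sc ++ "_XN") ∈ pvRSC r then pvAAdd sc "N" acc r.1 else acc
  if (sc ++ "_XR") ∈ pvRSC r then pvAAdd sc "R" acc r.1 else acc

def getScissorCrossing (network : List pvRoute) (routes : List pvRoute) : List (String × List (String × List String)) :=
  let scid := pvNeighbours network
  let scid := scid.keys.foldl (fun acc sc => routes.foldl (pvAStep sc) acc) scid
  scid.items.map (fun p => (p.1, p.2.items))

-- ===== PORT B =====
-- one pass over a route's entries: strip the _XN/_XR suffix, collect per-crossing flags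
def pvSeenStep (acc : pvOuter) (seen : PySem.Dict String (Bool × Bool)) (entry : String) : PySem.Dict String (Bool × Bool) :=
  if PySem.Str.endswith entry "_XN" then
    let base := PySem.Str.slice entry none (some (-3))
    if acc.contains base then seen.modify base (false, false) (fun p => (true, p.2)) else seen
  else if PySem.Str.endswith entry "_XR" then
    let base := PySem.Str.slice entry none (some (-3))
    if acc.contains base then seen.modify base (false, false) (fun p => (p.1, true)) else seen
  else seen

def pvSeen (acc : pvOuter) (r : pvRoute) : PySem.Dict String (Bool × Bool) :=
  (pvRSC r).foldl (pvSeenStep acc) PySem.Dict.empty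

-- body of B's 'for base, (hasN, hasR) in seen.items()' loop
def pvBApply (rname : String) (acc : pvOuter) (p : String × (Bool × Bool)) : pvOuter :=
  let d := acc.getD p.1 PySem.Dict.empty
  let d := if d.contains "Routes" then d else (d.insert "Routes" []).insert "Position" []
  let d := if p.2.1 then (d.insert "Routes" (d.getD "Routes" [] ++ [rname])).insert "Position" (d.getD "Position" [] ++ ["N"]) else d
  let d := if p.2.2 then (d.insert "Routes" (d.getD "Routes" [] ++ [rname])).insert "Position" (d.getD "Position" [] ++ ["R"]) else d
  acc.insert p.1 d

-- body of B's 'for route in routes' loop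
def pvBStep (acc : pvOuter) (r : pvRoute) : pvOuter :=
  (pvSeen acc r).items.foldl (pvBApply ("R" ++ r.1)) acc

def getScissorCrossing_alt (network : List pvRoute) (routes : List pvRoute) : List (String × List (String × List String)) :=
  let result := pvNeighbours network
  let result := routes.foldl pvBStep result
  result.items.map (fun p => (p.1, p.2.items))

-- ===== PRECONDITION & SPEC =====
-- Pre_/D_ are stated over the raw association lists with their own first-match
-- lookup (plain recursion, independent of the ports' PySem.Dict machinery).
def pvLookup? (k : String) : List (String × List String) → Option (List String)
  | [] => none
  | p :: t => if p.1 = k then some p.2 else pvLookup? k t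

-- all scissor-crossing names listed under a 'Crossing' key of some network entry
def pvCrossList (network : List pvRoute) : List String :=
  network.flatMap (fun e => (pvLookup? "Crossing" e.2).getD [])

-- Pre_ excludes exactly the inputs where A raises KeyError: some crossing exists (so A's
-- second loop indexes the routes) while some route's dict has no 'ScissorCrossings' key.
def Pre_getScissorCrossing (network : List (String × List (String × List String))) (routes : List (String × List (String × List String))) : Prop :=
  (∀ r ∈ routes, (pvLookup? "ScissorCrossings" r.2).isSome = true) ∨ pvCrossList network = []
instance (network : List (String × List (String × List String))) (routes : List (String × List (String × List String))) : Decidable (Pre_getScissorCrossing network routes) := by unfold Pre_getScissorCrossing; infer_instance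
def pvWitness_getScissorCrossing : (List (String × List (String × List String))) × (List (String × List (String × List String))) :=
  ([("a", [("Crossing", ["c"])])], [("r1", [("ScissorCrossings", ["c_XN", "c_XR"])])])

-- On inputs where two routes matching the same crossing have names r1 (earlier) and "R"++r1
-- (later), A's stale dedup check (it compares the raw route name against the already stored
-- 'R'-prefixed names) silently drops the later route; B records every matching route, which
-- is the intended reading.
def D_getScissorCrossing (network : List (String × List (String × List String))) (routes : List (String × List (String × List String))) : Prop :=
  ∃ sc ∈ pvCrossList network, ∃ i : Fin routes.length, ∃ j : Fin routes.length, i < j ∧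
    (∃ sfx ∈ ["_XN", "_XR"], sc ++ sfx ∈ (pvLookup? "ScissorCrossings" (routes[i]).2).getD []) ∧
    (∃ sfx ∈ ["_XN", "_XR"], sc ++ sfx ∈ (pvLookup? "ScissorCrossings" (routes[j]).2).getD []) ∧
    (routes[j]).1 = "R" ++ (routes[i]).1
instance (network : List (String × List (String × List String))) (routes : List (String × List (String × List String))) : Decidable (D_getScissorCrossing network routes) := by unfold D_getScissorCrossing; infer_instance

def Spec_getScissorCrossing (network : List (String × List (String × List String))) (routes : List (String × List (String × List String))) (out : List (String × List (String × List String))) : Prop := ¬ D_getScissorCrossing network routes → out = getScissorCrossing_alt network routes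
instance (network : List (String × List (String × List String))) (routes : List (String × List (String × List String))) (out : List (String × List (String × List String))) : Decidable (Spec_getScissorCrossing network routes out) := by unfold Spec_getScissorCrossing; infer_instance

def pvDiffWitness_getScissorCrossing : (List (String × List (String × List String))) × (List (String × List (String × List String))) :=
  ([("a", [("Crossing", ["c"])])], [("1", [("ScissorCrossings", ["c_XN"])]), ("R1", [("ScissorCrossings", ["c_XN"])])])
def pvDiffWitnessOut_getScissorCrossing : (List (String × List (String × List String))) × (List (String × List (String × List String))) :=
  ([("c", [("Neighbour", ["a"]), ("Routes", ["R1"]), ("Position", ["N"])])],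
   [("c", [("Neighbour", ["a"]), ("Routes", ["R1", "RR1"]), ("Position", ["N", "N"])])])

-- ===== CLAIM (what is proved, stated in full; the proofs are below) =====
def Claim_unchanged_getScissorCrossing : Prop := ∀ (network : List (String × List (String × List String))) (routes : List (String × List (String × List String))), Dom_getScissorCrossing network routes → Pre_getScissorCrossing network routes → Spec_getScissorCrossing network routes (getScissorCrossing network routes)
def Claim_changed_getScissorCrossing : Prop := Dom_getScissorCrossing (pvDiffWitness_getScissorCrossing.1) (pvDiffWitness_getScissorCrossing.2) ∧ Pre_getScissorCrossing (pvDiffWitness_getScissorCrossing.1) (pvDiffWitness_getScissorCrossing.2) ∧ D_getScissorCrossing (pvDiffWitness_getScissorCrossing.1) (pvDiffWitness_getScissorCrossing.2) ∧ getScissorCrossing (pvDiffWitness_getScissorCrossing.1) (pvDiffWitness_getScissorCrossing.2) = pvDiffWitnessOut_getScissorCrossing.1 ∧ getScissorCrossing_alt (pvDiffWitness_getScissorCrossing.1) (pvDiffWitness_getScissorCrossing.2) = pvDiffWitnessOut_getScissorCrossing.2 ∧ pvDiffWitnessOut_getScissorCrossing.1 ≠ pvDiffWitnessOut_getScissorC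rossing.2
def Claim_exact_getScissorCrossing : Prop := ∀ (network : List (String × List (String × List String))) (routes : List (String × List (String × List String))), Dom_getScissorCrossing network routes → Pre_getScissorCrossing network routes → D_getScissorCrossing network routes → getScissorCrossing network routes ≠ getScissorCrossing_alt network routes

-- ===== LEMMAS AND PROOFS =====

-- bridge: the plain first-match lookup of Pre_/D_ agrees with the ports' Dict.get?
lemma pvLookup?_eq (k : String) (l : List (String × List String)) :
    pvLookup? k l = (PySem.Dict.mk l).get? k := by
  induction l with
  | nil => rfl
  | cons p t ih =>
    rw [pvLookup?, PySem.Dict.get?_mk_cons]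
    by_cases h : p.1 = k
    · simp [h]
    · simp [h, ih]

lemma pvRSC_eq (r : pvRoute) : (pvLookup? "ScissorCrossings" r.2).getD [] = pvRSC r := by
  rw [pvRSC, pvLookup?_eq]

-- proof-side abbreviation: route r mentions crossing sc with either suffix
def pvMatches (sc : String) (r : pvRoute) : Bool :=
  decide ((sc ++ "_XN") ∈ pvRSC r) || decide ((sc ++ "_XR") ∈ pvRSC r)

lemma pvMatches_iff (sc : String) (r : pvRoute) :
    pvMatches sc r = true ↔ ((sc ++ "_XN") ∈ pvRSC r ∨ (sc ++ "_XR") ∈ pvRSC r) := by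
  rw [pvMatches]
  simp

lemma pvMatches_mentions (sc : String) (r : pvRoute) (h : pvMatches sc r = true) :
    ∃ sfx ∈ ["_XN", "_XR"], sc ++ sfx ∈ (pvLookup? "ScissorCrossings" r.2).getD [] := by
  rw [pvRSC_eq]
  rcases (pvMatches_iff sc r).mp h with h | h
  · exact ⟨"_XN", by simp, h⟩
  · exact ⟨"_XR", by simp, h⟩

lemma pvCrossEntry_eq (e2 : List (String × List String)) :
    (pvLookup? "Crossing" e2).getD [] =
      (if (PySem.Dict.mk e2 : pvInner).contains "Crossing" = true then (PySem.Dict.mk e2 : pvInner).getD "Crossing" [] else []) := by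
  rw [pvLookup?_eq]
  by_cases h : (PySem.Dict.mk e2 : pvInner).contains "Crossing" = true
  · rw [if_pos h, PySem.Dict.getD_eq_get?_getD]
  · rw [if_neg h]
    have hn : (PySem.Dict.mk e2 : pvInner).get? "Crossing" = none := by
      rw [PySem.Dict.get?_eq_none_iff_contains]
      exact Bool.not_eq_true _ ▸ (by simpa using h)
    rw [hn]
    rfl

-- the per-route contribution of route r to crossing sc's Routes/Position columns
def pvContrib (sc : String) (r : pvRoute) : List (String × String) :=
  (if (sc ++ "_XN") ∈ pvRSC r then [("R" ++ r.1, "N")] else []) ++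
  (if (sc ++ "_XR") ∈ pvRSC r then [("R" ++ r.1, "R")] else [])

-- a phase-1 inner dict extended with accumulated Routes/Position columns
def pvUpd (d : pvInner) (l : List (String × String)) : pvInner :=
  if l = [] then d else (d.insert "Routes" (l.map Prod.fst)).insert "Position" (l.map Prod.snd)

-- the common normal form both ports are proved equal to
def pvTarget (network routes : List pvRoute) : List (String × List (String × List String)) :=
  (pvNeighbours network).items.map (fun p => (p.1, (pvUpd p.2 (routes.flatMap (pvContrib p.1))).items))

lemma pvStr_ne_R_append (s : String) : s ≠ "R" ++ s := by
  intro h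
  have := congrArg (fun t => t.toList.length) h
  simp [String.toList_append] at this

lemma pvMap_keyfree {α : Type} (l : List (String × α)) (k : String) (v : α)
    (h : ∀ p ∈ l, p.1 ≠ k) : l.map (fun p => if (p.1 == k) = true then (k, v) else p) = l := by
  have h2 : ∀ p ∈ l, (if (p.1 == k) = true then (k, v) else p) = id p := by
    intro p hp; simp [h p hp]
  rw [List.map_congr_left h2, List.map_id]

lemma pvNotContains_key {ν : Type} (d : PySem.Dict String ν) (k : String)
    (h : d.contains k = false) : ∀ p ∈ d.items, p.1 ≠ k := by
  intro p hp he
  have : d.contains k = true := by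
    rw [PySem.Dict.contains_iff_mem_keys]
    exact he ▸ List.mem_map_of_mem hp
  simp [this] at h

lemma pvItems_RP (d : pvInner) (hR : d.contains "Routes" = false)
    (hP : d.contains "Position" = false) (a b : List String) :
    ((d.insert "Routes" a).insert "Position" b).items = d.items ++ [("Routes", a), ("Position", b)] := by
  have h2 : (d.insert "Routes" a).contains "Position" = false := by
    rw [PySem.Dict.contains_insert, hP]; simp
  rw [PySem.Dict.items_insert, h2, PySem.Dict.items_insert, hR]
  simp

lemma pvRP_contains_R (d : pvInner) (a b : List String) :
    ((d.insert "Routes" a).insert "Position" b).contains "Routes" = true := by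
  rw [PySem.Dict.contains_insert]
  simp [PySem.Dict.contains_insert_self]

lemma pvRP_getD_R (d : pvInner) (a b : List String) :
    ((d.insert "Routes" a).insert "Position" b).getD "Routes" [] = a := by
  rw [PySem.Dict.getD_insert_of_ne _ _ _ (show ("Routes" : String) ≠ "Position" by decide)]
  simp [PySem.Dict.getD_insert_self]

lemma pvRP_getD_P (d : pvInner) (a b : List String) :
    ((d.insert "Routes" a).insert "Position" b).getD "Position" [] = b := by
  simp [PySem.Dict.getD_insert_self]

lemma pvRP_overwrite_R (d : pvInner) (hR : d.contains "Routes" = false)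
    (hP : d.contains "Position" = false) (a b a' : List String) :
    ((d.insert "Routes" a).insert "Position" b).insert "Routes" a' = (d.insert "Routes" a').insert "Position" b := by
  apply PySem.Dict.ext
  rw [PySem.Dict.items_insert_of_contains _ _ (pvRP_contains_R d a b)]
  rw [pvItems_RP d hR hP a b, pvItems_RP d hR hP a' b]
  rw [List.map_append, pvMap_keyfree _ _ _ (pvNotContains_key d _ hR)]
  simp

lemma pvUpd_nil (d : pvInner) : pvUpd d [] = d := by simp [pvUpd]

lemma pvUpd_cons (d : pvInner) (pre : List (String × String)) (h : pre ≠ []) :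
    pvUpd d pre = (d.insert "Routes" (pre.map Prod.fst)).insert "Position" (pre.map Prod.snd) := by
  simp [pvUpd, h]

lemma pvIf_getD_R (d : pvInner) (hR : d.contains "Routes" = false)
    (hP : d.contains "Position" = false) (pre : List (String × String)) :
    (if (pvUpd d pre).contains "Routes" = true then pvUpd d pre
     else ((pvUpd d pre).insert "Routes" []).insert "Position" []).getD "Routes" [] = pre.map Prod.fst := by
  by_cases hpre : pre = []
  · subst hpre
    rw [pvUpd_nil, hR]
    simp only [Bool.false_eq_true, if_false, List.map_nil]
    rw [pvRP_getD_R]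
  · rw [pvUpd_cons d pre hpre, pvRP_contains_R, if_pos rfl, pvRP_getD_R]

lemma pvIf_getD_P (d : pvInner) (hR : d.contains "Routes" = false)
    (hP : d.contains "Position" = false) (pre : List (String × String)) :
    (if (pvUpd d pre).contains "Routes" = true then pvUpd d pre
     else ((pvUpd d pre).insert "Routes" []).insert "Position" []).getD "Position" [] = pre.map Prod.snd := by
  by_cases hpre : pre = []
  · subst hpre
    rw [pvUpd_nil, hR]
    simp only [Bool.false_eq_true, if_false, List.map_nil]
    rw [pvRP_getD_P]
  · rw [pvUpd_cons d pre hpre, pvRP_contains_R, if_pos rfl, pvRP_getD_P]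

lemma pvUpd_step (d : pvInner) (hR : d.contains "Routes" = false)
    (hP : d.contains "Position" = false) (pre : List (String × String)) (x pos : String) :
    ((if (pvUpd d pre).contains "Routes" = true then pvUpd d pre
      else ((pvUpd d pre).insert "Routes" []).insert "Position" []).insert "Routes" (pre.map Prod.fst ++ [x])).insert "Position" (pre.map Prod.snd ++ [pos])
    = pvUpd d (pre ++ [(x, pos)]) := by
  by_cases hpre : pre = []
  · subst hpre
    rw [pvUpd_nil, hR]
    simp only [Bool.false_eq_true, if_false, List.map_nil, List.nil_append]
    rw [pvRP_overwrite_R d hR hP, PySem.Dict.insert_insert_self]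
    simp [pvUpd]
  · rw [pvUpd_cons d pre hpre, pvRP_contains_R, if_pos rfl]
    rw [pvRP_overwrite_R d hR hP, PySem.Dict.insert_insert_self]
    rw [pvUpd_cons d _ (by simp : pre ++ [(x, pos)] ≠ [])]
    simp

lemma pvUpd_append (d : pvInner) (hR : d.contains "Routes" = false)
    (hP : d.contains "Position" = false) (pre : List (String × String)) (hne : pre ≠ [])
    (x pos : String) :
    ((pvUpd d pre).insert "Routes" ((pvUpd d pre).getD "Routes" [] ++ [x])).insert "Position" ((pvUpd d pre).getD "Position" [] ++ [pos])
    = pvUpd d (pre ++ [(x, pos)]) := by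
  rw [pvUpd_cons d pre hne, pvRP_getD_R, pvRP_getD_P]
  rw [pvRP_overwrite_R d hR hP, PySem.Dict.insert_insert_self]
  rw [pvUpd_cons d _ (by simp : pre ++ [(x, pos)] ≠ [])]
  simp

lemma pvInsert_self_of_get? (b : pvOuter) (k : String) (v : pvInner)
    (h : b.get? k = some v) (hnd : b.keys.Nodup) : b.insert k v = b := by
  apply PySem.Dict.ext
  have hc : b.contains k = true := by
    rw [PySem.Dict.contains_iff_mem_keys]
    exact List.mem_map_of_mem (PySem.Dict.mem_items_of_get?_eq_some _ h)
  rw [PySem.Dict.items_insert_of_contains _ _ hc]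
  have h2 : ∀ p ∈ b.items, (if (p.1 == k) = true then (k, v) else p) = id p := by
    intro p hp
    by_cases hk : p.1 = k
    · have hmem : (k, p.2) ∈ b.items := by rw [← hk]; exact hp
      have hgv := PySem.Dict.get?_of_mem_items _ hmem hnd
      rw [h] at hgv
      have hv : v = p.2 := Option.some.inj hgv
      simp [hk, hv, Prod.ext_iff]
    · simp [hk]
  rw [List.map_congr_left h2, List.map_id]

lemma pvAAdd_eq (sc pos r1 : String) (b : pvOuter) (d0 : pvInner)
    (hR : d0.contains "Routes" = false) (hP : d0.contains "Position" = false)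
    (pre : List (String × String)) (hb : b.get? sc = some (pvUpd d0 pre))
    (hg : r1 ∉ pre.map Prod.fst) :
    pvAAdd sc pos b r1 = b.insert sc (pvUpd d0 (pre ++ [("R" ++ r1, pos)])) := by
  unfold pvAAdd
  dsimp only
  rw [PySem.Dict.getD_of_get?_eq_some _ _ hb]
  rw [pvIf_getD_R d0 hR hP pre, pvIf_getD_P d0 hR hP pre]
  rw [if_neg hg]
  exact congrArg (b.insert sc) (pvUpd_step d0 hR hP pre ("R" ++ r1) pos)

lemma pvContrib_fst (sc : String) (r : pvRoute) :
    ∀ q ∈ pvContrib sc r, q.1 = "R" ++ r.1 := by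
  intro q hq
  unfold pvContrib at hq
  rcases List.mem_append.mp hq with h | h <;> split at h <;> simp_all

lemma pvContrib_ne_nil_matches (sc : String) (r : pvRoute) (h : pvContrib sc r ≠ []) :
    pvMatches sc r = true := by
  rw [pvMatches_iff]
  unfold pvContrib at h
  by_contra hc
  push_neg at hc
  simp [hc.1, hc.2] at h

lemma pvAStep_eq (sc : String) (r : pvRoute) (b : pvOuter) (d0 : pvInner)
    (hR : d0.contains "Routes" = false) (hP : d0.contains "Position" = false)
    (pre : List (String × String)) (hnd : b.keys.Nodup)
    (hb : b.get? sc = some (pvUpd d0 pre))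
    (hg : pvMatches sc r = true → r.1 ∉ pre.map Prod.fst) :
    pvAStep sc b r = b.insert sc (pvUpd d0 (pre ++ pvContrib sc r)) := by
  unfold pvAStep
  dsimp only
  by_cases hN : (sc ++ "_XN") ∈ pvRSC r
  · rw [if_pos hN]
    have hm : pvMatches sc r = true := (pvMatches_iff sc r).mpr (Or.inl hN)
    rw [pvAAdd_eq sc "N" r.1 b d0 hR hP pre hb (hg hm)]
    by_cases hRm : (sc ++ "_XR") ∈ pvRSC r
    · rw [if_pos hRm]
      have hg2 : r.1 ∉ (pre ++ [("R" ++ r.1, "N")]).map Prod.fst := by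
        simp only [List.map_append, List.mem_append, List.map_cons, List.map_nil,
          List.mem_singleton]
        rintro (h | h)
        · exact hg hm h
        · exact pvStr_ne_R_append r.1 h
      rw [pvAAdd_eq sc "R" r.1 _ d0 hR hP (pre ++ [("R" ++ r.1, "N")])
        (PySem.Dict.get?_insert_self _ _ _) hg2]
      rw [PySem.Dict.insert_insert_self]
      simp [pvContrib, hN, hRm]
    · rw [if_neg hRm]
      simp [pvContrib, hN, hRm]
  · rw [if_neg hN]
    by_cases hRm : (sc ++ "_XR") ∈ pvRSC r
    · rw [if_pos hRm]
      rw [pvAAdd_eq sc "R" r.1 b d0 hR hP pre hb (hg ((pvMatches_iff sc r).mpr (Or.inr hRm)))]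
      simp [pvContrib, hN, hRm]
    · rw [if_neg hRm]
      have hc : pvContrib sc r = [] := by simp [pvContrib, hN, hRm]
      rw [hc, List.append_nil, pvInsert_self_of_get? b sc _ hb hnd]

-- A's second loop as a plain list fold: append r's contribution unless A's dedup check
-- (raw route name against the stored names) fires
def pvStepL (sc : String) (l : List (String × String)) (r : pvRoute) : List (String × String) :=
  if r.1 ∈ l.map Prod.fst ∧ pvMatches sc r = true then l else l ++ pvContrib sc r

lemma pvContrib_nil_of_not_matches (sc : String) (r : pvRoute) (h : ¬ pvMatches sc r = true) :
    pvContrib sc r = [] := by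
  by_contra hc
  exact h (pvContrib_ne_nil_matches sc r hc)

lemma pvAStep_skip (sc : String) (r : pvRoute) (b : pvOuter) (d0 : pvInner)
    (hR : d0.contains "Routes" = false) (hP : d0.contains "Position" = false)
    (pre : List (String × String)) (hnd : b.keys.Nodup)
    (hb : b.get? sc = some (pvUpd d0 pre))
    (hmem : r.1 ∈ pre.map Prod.fst) :
    pvAStep sc b r = b := by
  have hpre : pre ≠ [] := by intro h; subst h; simp at hmem
  have hAAdd : ∀ pos, pvAAdd sc pos b r.1 = b := by
    intro pos
    unfold pvAAdd
    dsimp only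
    rw [PySem.Dict.getD_of_get?_eq_some _ _ hb]
    rw [pvUpd_cons d0 pre hpre, pvRP_contains_R, if_pos rfl, pvRP_getD_R, if_pos hmem]
    rw [← pvUpd_cons d0 pre hpre]
    exact pvInsert_self_of_get? b sc _ hb hnd
  unfold pvAStep
  dsimp only
  by_cases hN : (sc ++ "_XN") ∈ pvRSC r
  · rw [if_pos hN, hAAdd]
    by_cases hRm : (sc ++ "_XR") ∈ pvRSC r
    · rw [if_pos hRm, hAAdd]
    · rw [if_neg hRm]
  · rw [if_neg hN]
    by_cases hRm : (sc ++ "_XR") ∈ pvRSC r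
    · rw [if_pos hRm, hAAdd]
    · rw [if_neg hRm]

-- A's per-crossing fold, characterised on EVERY input (skips included)
lemma pvFoldA_gen (sc : String) (d0 : pvInner)
    (hR : d0.contains "Routes" = false) (hP : d0.contains "Position" = false) :
    ∀ (rs : List pvRoute) (b : pvOuter) (pre : List (String × String)),
    b.keys.Nodup → b.get? sc = some (pvUpd d0 pre) →
    rs.foldl (pvAStep sc) b = b.insert sc (pvUpd d0 (rs.foldl (pvStepL sc) pre)) := by
  intro rs
  induction rs with
  | nil =>
    intro b pre hnd hb
    simp only [List.foldl_nil]
    exact (pvInsert_self_of_get? b sc _ hb hnd).symm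
  | cons r rs ih =>
    intro b pre hnd hb
    simp only [List.foldl_cons]
    by_cases hmem : r.1 ∈ pre.map Prod.fst
    · rw [pvAStep_skip sc r b d0 hR hP pre hnd hb hmem]
      have hstep : pvStepL sc pre r = pre := by
        unfold pvStepL
        by_cases hm : pvMatches sc r = true
        · rw [if_pos ⟨hmem, hm⟩]
        · rw [if_neg (fun h => hm h.2), pvContrib_nil_of_not_matches sc r hm, List.append_nil]
      rw [hstep]
      exact ih b pre hnd hb
    · rw [pvAStep_eq sc r b d0 hR hP pre hnd hb (fun _ => hmem)]
      have hstep : pvStepL sc pre r = pre ++ pvContrib sc r := by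
        unfold pvStepL
        rw [if_neg (fun h => hmem h.1)]
      rw [hstep]
      rw [ih _ (pre ++ pvContrib sc r) (PySem.Dict.nodup_keys_insert _ _ _ hnd)
        (PySem.Dict.get?_insert_self _ _ _)]
      rw [PySem.Dict.insert_insert_self]

-- without a skip (guaranteed outside D_), the fold is the plain concatenation
lemma pvNoSkip (sc : String) :
    ∀ (rs : List pvRoute) (pre : List (String × String)),
    (∀ r ∈ rs, pvMatches sc r = true → r.1 ∉ pre.map Prod.fst) →
    List.Pairwise (fun a b' => pvMatches sc a = true → pvMatches sc b' = true → b'.1 ≠ "R" ++ a.1) rs →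
    rs.foldl (pvStepL sc) pre = pre ++ rs.flatMap (pvContrib sc) := by
  intro rs
  induction rs with
  | nil =>
    intro pre _ _
    simp
  | cons r rs ih =>
    intro pre hpre hpw
    simp only [List.foldl_cons]
    have hstep : pvStepL sc pre r = pre ++ pvContrib sc r := by
      unfold pvStepL
      by_cases hm : pvMatches sc r = true
      · rw [if_neg (fun h => hpre r List.mem_cons_self hm h.1)]
      · rw [if_neg (fun h => hm h.2)]
    rw [hstep]
    have hpw' := List.pairwise_cons.mp hpw
    have hpre' : ∀ r' ∈ rs, pvMatches sc r' = true → r'.1 ∉ (pre ++ pvContrib sc r).map Prod.fst := by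
      intro r' hr' hm'
      simp only [List.map_append, List.mem_append]
      rintro (h | h)
      · exact hpre r' (List.mem_cons_of_mem _ hr') hm' h
      · obtain ⟨q, hq, hq2⟩ := List.mem_map.mp h
        have hcne : pvContrib sc r ≠ [] := by intro hcc; rw [hcc] at hq; simp at hq
        have hm : pvMatches sc r = true := pvContrib_ne_nil_matches sc r hcne
        have := hpw'.1 r' hr' hm hm'
        rw [← hq2, pvContrib_fst sc r q hq] at this
        exact this rfl
    rw [ih (pre ++ pvContrib sc r) hpre' hpw'.2, List.flatMap_cons, List.append_assoc]

-- generic: a fold inserting at pairwise-distinct existing keys rewrites the items pointwise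
lemma pvFoldl_insert_items {α : Type} (key : α → String) (F : String → pvInner) :
    ∀ (ks : List α) (step : pvOuter → α → pvOuter) (acc : pvOuter),
    (ks.map key).Nodup → acc.keys.Nodup →
    (∀ a ∈ ks, acc.contains (key a) = true) →
    (∀ a ∈ ks, ∀ b : pvOuter, b.keys.Nodup → b.get? (key a) = acc.get? (key a) →
        step b a = b.insert (key a) (F (key a))) →
    (ks.foldl step acc).items = acc.items.map (fun p => if p.1 ∈ ks.map key then (p.1, F p.1) else p) := by
  intro ks
  induction ks with
  | nil =>
    intro step acc _ _ _ _
    simp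
  | cons a ks ih =>
    intro step acc hnd hand hcont hstep
    simp only [List.foldl_cons]
    have hne : key a ∉ ks.map key := by
      simp only [List.map_cons, List.nodup_cons] at hnd
      exact hnd.1
    have hndk : (ks.map key).Nodup := by
      simp only [List.map_cons, List.nodup_cons] at hnd
      exact hnd.2
    rw [hstep a List.mem_cons_self acc hand rfl]
    have h1 : ∀ x ∈ ks, (acc.insert (key a) (F (key a))).contains (key x) = true := by
      intro x hx
      rw [PySem.Dict.contains_insert, hcont x (List.mem_cons_of_mem _ hx)]
      simp
    have h2 : ∀ x ∈ ks, (acc.insert (key a) (F (key a))).get? (key x) = acc.get? (key x) := by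
      intro x hx
      exact PySem.Dict.get?_insert_of_ne _ _ (fun he => hne (he ▸ List.mem_map_of_mem hx))
    rw [ih step (acc.insert (key a) (F (key a))) hndk (PySem.Dict.nodup_keys_insert _ _ _ hand) h1
      (fun x hx b hb hg => hstep x (List.mem_cons_of_mem _ hx) b hb (by rw [hg, h2 x hx]))]
    rw [PySem.Dict.items_insert_of_contains _ _ (hcont a List.mem_cons_self)]
    rw [List.map_map]
    apply List.map_congr_left
    intro p hp
    by_cases hpk : p.1 = key a
    · have hbeq : (p.1 == key a) = true := by simp [hpk]
      simp only [Function.comp_apply, hbeq, if_true]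
      rw [if_neg hne, if_pos (by simp [hpk]), hpk]
    · have hbeq : (p.1 == key a) = false := by simp [hpk]
      simp only [Function.comp_apply, hbeq, Bool.false_eq_true, if_false]
      by_cases hmem : p.1 ∈ ks.map key
      · rw [if_pos hmem, if_pos (by simp [hmem])]
      · rw [if_neg hmem, if_neg (by simp [List.mem_cons, hpk, hmem])]

-- phase 1: one inner-loop step preserves nodup keys and the {'Neighbour': nb} shape
lemma pvNbAdd_spec (x sc : String) (acc : pvOuter)
    (hnd : acc.keys.Nodup)
    (hsh : ∀ p ∈ acc.items, ∃ nb, p.2 = PySem.Dict.mk [("Neighbour", nb)]) :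
    (pvNbAdd x acc sc).keys.Nodup ∧
    (∀ p ∈ (pvNbAdd x acc sc).items, ∃ nb, p.2 = PySem.Dict.mk [("Neighbour", nb)]) ∧
    (∀ k, (pvNbAdd x acc sc).contains k = true → acc.contains k = true ∨ k = sc) := by
  have hmkins : ∀ (nb v : List String),
      (PySem.Dict.mk [("Neighbour", nb)] : pvInner).insert "Neighbour" v = PySem.Dict.mk [("Neighbour", v)] := by
    intro nb v
    apply PySem.Dict.ext
    rw [PySem.Dict.items_insert_of_contains _ _ (by simp)]
    simp
  unfold pvNbAdd
  dsimp only
  by_cases hc : acc.contains sc = true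
  · rw [if_pos hc]
    obtain ⟨p, hp, hfst⟩ := List.mem_map.mp ((PySem.Dict.contains_iff_mem_keys _ _).mp hc)
    have hmem : (sc, p.2) ∈ acc.items := by rw [← hfst]; exact hp
    have hget : acc.get? sc = some p.2 := PySem.Dict.get?_of_mem_items _ hmem hnd
    obtain ⟨nb, hnb⟩ := hsh p hp
    rw [PySem.Dict.getD_of_get?_eq_some _ _ hget, hnb]
    have hnbv : (PySem.Dict.mk [("Neighbour", nb)] : pvInner).getD "Neighbour" [] = nb := by
      simp [PySem.Dict.getD_eq_get?_getD, PySem.Dict.get?_mk_cons]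
    rw [hnbv]
    by_cases hx : x ∈ nb
    · rw [if_pos hx]
      exact ⟨hnd, hsh, fun k hk => Or.inl hk⟩
    · rw [if_neg hx, hmkins]
      refine ⟨PySem.Dict.nodup_keys_insert _ _ _ hnd, ?_, ?_⟩
      · intro q hq
        rcases (PySem.Dict.mem_items_insert _ _ _ _).mp hq with h | h
        · exact ⟨nb ++ [x], by rw [h]⟩
        · exact hsh q h.1
      · intro k hk
        rw [PySem.Dict.contains_insert] at hk
        rcases Bool.or_eq_true_iff.mp hk with h | h
        · exact Or.inr (by simpa using h)
        · exact Or.inl h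
  · rw [if_neg hc]
    rw [PySem.Dict.getD_of_get?_eq_some _ _ (PySem.Dict.get?_insert_self _ _ _)]
    have hnbv : (PySem.Dict.mk [("Neighbour", [])] : pvInner).getD "Neighbour" [] = ([] : List String) := by
      simp [PySem.Dict.getD_eq_get?_getD, PySem.Dict.get?_mk_cons]
    rw [hnbv]
    rw [if_neg (by simp : ¬ x ∈ ([] : List String))]
    rw [hmkins, PySem.Dict.insert_insert_self]
    refine ⟨PySem.Dict.nodup_keys_insert _ _ _ hnd, ?_, ?_⟩
    · intro q hq
      rcases (PySem.Dict.mem_items_insert _ _ _ _).mp hq with h | h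
      · exact ⟨[] ++ [x], by rw [h]⟩
      · exact hsh q h.1
    · intro k hk
      rw [PySem.Dict.contains_insert] at hk
      rcases Bool.or_eq_true_iff.mp hk with h | h
      · exact Or.inr (by simpa using h)
      · exact Or.inl h

lemma pvNbFold_spec (x : String) :
    ∀ (scs : List String) (acc : pvOuter),
    acc.keys.Nodup →
    (∀ p ∈ acc.items, ∃ nb, p.2 = PySem.Dict.mk [("Neighbour", nb)]) →
    ((scs.foldl (pvNbAdd x) acc).keys.Nodup ∧
     (∀ p ∈ (scs.foldl (pvNbAdd x) acc).items, ∃ nb, p.2 = PySem.Dict.mk [("Neighbour", nb)]) ∧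
     (∀ k, (scs.foldl (pvNbAdd x) acc).contains k = true → acc.contains k = true ∨ k ∈ scs)) := by
  intro scs
  induction scs with
  | nil =>
    intro acc h1 h2
    exact ⟨h1, h2, fun k hk => Or.inl hk⟩
  | cons sc scs ih =>
    intro acc h1 h2
    simp only [List.foldl_cons]
    obtain ⟨g1, g2, g3⟩ := pvNbAdd_spec x sc acc h1 h2
    obtain ⟨f1, f2, f3⟩ := ih (pvNbAdd x acc sc) g1 g2
    refine ⟨f1, f2, ?_⟩
    intro k hk
    rcases f3 k hk with h | h
    · rcases g3 k h with h' | h'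
      · exact Or.inl h'
      · exact Or.inr (by simp [h'])
    · exact Or.inr (List.mem_cons_of_mem _ h)

lemma pvPhase1_fold :
    ∀ (net : List pvRoute) (acc : pvOuter),
    acc.keys.Nodup →
    (∀ p ∈ acc.items, ∃ nb, p.2 = PySem.Dict.mk [("Neighbour", nb)]) →
    ((net.foldl (fun acc e =>
        let ed : pvInner := PySem.Dict.mk e.2
        if ed.contains "Crossing" then (ed.getD "Crossing" []).foldl (pvNbAdd e.1) acc else acc) acc).keys.Nodup ∧
     (∀ p ∈ (net.foldl (fun acc e =>
        let ed : pvInner := PySem.Dict.mk e.2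
        if ed.contains "Crossing" then (ed.getD "Crossing" []).foldl (pvNbAdd e.1) acc else acc) acc).items,
        ∃ nb, p.2 = PySem.Dict.mk [("Neighbour", nb)]) ∧
     (∀ k, (net.foldl (fun acc e =>
        let ed : pvInner := PySem.Dict.mk e.2
        if ed.contains "Crossing" then (ed.getD "Crossing" []).foldl (pvNbAdd e.1) acc else acc) acc).contains k = true →
        acc.contains k = true ∨ k ∈ pvCrossList net)) := by
  intro net
  induction net with
  | nil =>
    intro acc h1 h2
    exact ⟨h1, h2, fun k hk => Or.inl hk⟩
  | cons e net ih =>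
    intro acc h1 h2
    simp only [List.foldl_cons]
    have hcl : pvCrossList (e :: net) =
        (if (PySem.Dict.mk e.2 : pvInner).contains "Crossing" = true then (PySem.Dict.mk e.2 : pvInner).getD "Crossing" [] else []) ++ pvCrossList net := by
      rw [pvCrossList, List.flatMap_cons, ← pvCrossEntry_eq]
      rfl
    by_cases hc : (PySem.Dict.mk e.2 : pvInner).contains "Crossing" = true
    · simp only [hc, if_true]
      obtain ⟨g1, g2, g3⟩ := pvNbFold_spec e.1 ((PySem.Dict.mk e.2 : pvInner).getD "Crossing" []) acc h1 h2
      obtain ⟨f1, f2, f3⟩ := ih _ g1 g2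
      refine ⟨f1, f2, ?_⟩
      intro k hk
      rcases f3 k hk with h | h
      · rcases g3 k h with h' | h'
        · exact Or.inl h'
        · refine Or.inr ?_
          rw [hcl, if_pos hc]
          exact List.mem_append.mpr (Or.inl h')
      · exact Or.inr (by rw [hcl]; exact List.mem_append.mpr (Or.inr h))
    · simp only [hc, Bool.false_eq_true, if_false]
      obtain ⟨f1, f2, f3⟩ := ih acc h1 h2
      refine ⟨f1, f2, ?_⟩
      intro k hk
      rcases f3 k hk with h | h
      · exact Or.inl h
      · exact Or.inr (by rw [hcl]; exact List.mem_append.mpr (Or.inr h))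

lemma pvPhase1_spec (network : List pvRoute) :
    (pvNeighbours network).keys.Nodup ∧
    (∀ p ∈ (pvNeighbours network).items, ∃ nb, p.2 = PySem.Dict.mk [("Neighbour", nb)]) ∧
    (∀ k, (pvNeighbours network).contains k = true → k ∈ pvCrossList network) := by
  obtain ⟨f1, f2, f3⟩ := pvPhase1_fold network PySem.Dict.empty
    (by rw [PySem.Dict.keys_empty]; exact List.nodup_nil)
    (by intro p hp; simp [PySem.Dict.empty] at hp)
  refine ⟨f1, f2, ?_⟩
  intro k hk
  rcases f3 k hk with h | h
  · rw [PySem.Dict.contains_empty] at h; exact absurd h (by simp)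
  · exact h

-- A on every input: each crossing's columns are the skip-aware fold pvStepL
lemma pvA_char (network routes : List pvRoute) :
    getScissorCrossing network routes =
      (pvNeighbours network).items.map
        (fun p => (p.1, (pvUpd p.2 (routes.foldl (pvStepL p.1) [])).items)) := by
  obtain ⟨hnd, hsh, _⟩ := pvPhase1_spec network
  have hstep : ∀ sc ∈ (pvNeighbours network).keys, ∀ b : pvOuter, b.keys.Nodup →
      b.get? sc = (pvNeighbours network).get? sc →
      routes.foldl (pvAStep sc) b = b.insert sc
        (pvUpd ((pvNeighbours network).getD sc PySem.Dict.empty) (routes.foldl (pvStepL sc) [])) := by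
    intro sc hsc b hndb hgb
    have hsc0 := hsc
    simp only [PySem.Dict.keys] at hsc0
    obtain ⟨p, hp, hfst⟩ := List.mem_map.mp hsc0
    have hmem : (sc, p.2) ∈ (pvNeighbours network).items := by rw [← hfst]; exact hp
    have hget : (pvNeighbours network).get? sc = some p.2 := PySem.Dict.get?_of_mem_items _ hmem hnd
    obtain ⟨nb, hnb⟩ := hsh p hp
    have hR : p.2.contains "Routes" = false := by rw [hnb]; simp [PySem.Dict.contains_mk]
    have hP : p.2.contains "Position" = false := by rw [hnb]; simp [PySem.Dict.contains_mk]
    have hb : b.get? sc = some (pvUpd p.2 []) := by rw [pvUpd_nil, hgb, hget]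
    rw [pvFoldA_gen sc p.2 hR hP routes b [] hndb hb]
    rw [PySem.Dict.getD_of_get?_eq_some _ _ hget]
  unfold getScissorCrossing
  dsimp only
  rw [pvFoldl_insert_items (fun k => k)
      (fun k => pvUpd ((pvNeighbours network).getD k PySem.Dict.empty) (routes.foldl (pvStepL k) []))
      (pvNeighbours network).keys (fun acc sc => routes.foldl (pvAStep sc) acc) (pvNeighbours network)
      (by simpa using hnd) hnd
      (fun a ha => (PySem.Dict.contains_iff_mem_keys _ _).mpr ha)
      (fun a ha => hstep a (by simpa using ha))]
  rw [List.map_map]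
  apply List.map_congr_left
  intro p hp
  have hk0 : p.1 ∈ (pvNeighbours network).keys := by
    simp only [PySem.Dict.keys]
    exact List.mem_map_of_mem hp
  have hmemk : p.1 ∈ (pvNeighbours network).keys.map (fun k => k) := by simpa using hk0
  simp only [Function.comp_apply]
  rw [if_pos hmemk, PySem.Dict.getD_of_mem_items _ hp hnd]

lemma pvA_eq_target (network routes : List pvRoute)
    (hD : ¬ D_getScissorCrossing network routes) :
    getScissorCrossing network routes = pvTarget network routes := by
  obtain ⟨hnd, hsh, hkeys⟩ := pvPhase1_spec network
  rw [pvA_char network routes]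
  unfold pvTarget
  apply List.map_congr_left
  intro p hp
  have hscc : p.1 ∈ pvCrossList network :=
    hkeys p.1 ((PySem.Dict.contains_iff_mem_keys _ _).mpr (by
      simp only [PySem.Dict.keys]; exact List.mem_map_of_mem hp))
  have hpw : List.Pairwise (fun a b' => pvMatches p.1 a = true → pvMatches p.1 b' = true → b'.1 ≠ "R" ++ a.1) routes := by
    rw [List.pairwise_iff_getElem]
    intro i j hi hj hij hm1 hm2 heq
    exact hD ⟨p.1, hscc, ⟨i, hi⟩, ⟨j, hj⟩, hij,
      pvMatches_mentions p.1 _ hm1, pvMatches_mentions p.1 _ hm2, heq⟩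
  rw [pvNoSkip p.1 routes [] (by simp) hpw]
  simp

-- ===== B side =====

lemma pvSuffix_iff (sc entry sfx : String) (h3 : sfx.toList.length = 3) :
    sc ++ sfx = entry ↔ (PySem.Str.endswith entry sfx = true ∧ PySem.Str.slice entry none (some (-3)) = sc) := by
  have hslice : ∀ (t : String), (PySem.Str.slice t none (some (-3))).toList = t.toList.take (t.toList.length - 3) := by
    intro t
    rw [PySem.Str.toList_slice, PySem.Chars.slice_eq_listSlice]
    simp [PySem.List.slice]
  constructor
  · rintro rfl
    constructor
    · rw [PySem.Str.endswith_eq, PySem.Chars.endswith_iff, String.toList_append]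
      exact List.suffix_append _ _
    · rw [← String.toList_inj, hslice, String.toList_append, List.length_append, h3]
      have h4 : sc.toList.length + 3 - 3 = sc.toList.length := by omega
      rw [h4]
      exact List.take_left' rfl
  · rintro ⟨he, hs⟩
    rw [PySem.Str.endswith_eq, PySem.Chars.endswith_iff] at he
    obtain ⟨pre, hpre⟩ := he
    have hlen : entry.toList.length = pre.length + 3 := by rw [← hpre, List.length_append, h3]
    have htake : entry.toList.take (entry.toList.length - 3) = pre := by
      rw [hlen, Nat.add_sub_cancel, ← hpre]
      exact List.take_left' rfl
    rw [← String.toList_inj, hslice, htake] at hs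
    rw [← String.toList_inj, String.toList_append, ← hs, hpre]

lemma pvNotBoth (entry : String) (hN : PySem.Str.endswith entry "_XN" = true) :
    PySem.Str.endswith entry "_XR" = false := by
  by_contra h
  rw [Bool.not_eq_false] at h
  rw [PySem.Str.endswith_eq, PySem.Chars.endswith_iff] at hN h
  obtain ⟨p1, h1⟩ := hN
  obtain ⟨p2, h2⟩ := h
  have hlen : p1.length = p2.length := by
    have hl := congrArg List.length (h1.trans h2.symm)
    simp only [List.length_append] at hl
    have e1 : ("_XN".toList).length = 3 := by decide
    have e2 : ("_XR".toList).length = 3 := by decide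
    omega
  have := List.append_inj_right (h1.trans h2.symm) hlen
  exact absurd this (by decide)

lemma pvSeenStep_spec (b : pvOuter) (s : PySem.Dict String (Bool × Bool)) (pref : List String) (e : String)
    (h1 : s.keys.Nodup)
    (h2 : ∀ sc, s.contains sc = (b.contains sc && decide ((sc ++ "_XN") ∈ pref ∨ (sc ++ "_XR") ∈ pref)))
    (h3 : ∀ sc, b.contains sc = true → s.getD sc (false, false) = (decide ((sc ++ "_XN") ∈ pref), decide ((sc ++ "_XR") ∈ pref))) :
    ((pvSeenStep b s e).keys.Nodup ∧
     (∀ sc, (pvSeenStep b s e).contains sc = (b.contains sc && decide ((sc ++ "_XN") ∈ pref ++ [e] ∨ (sc ++ "_XR") ∈ pref ++ [e]))) ∧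
     (∀ sc, b.contains sc = true → (pvSeenStep b s e).getD sc (false, false) = (decide ((sc ++ "_XN") ∈ pref ++ [e]), decide ((sc ++ "_XR") ∈ pref ++ [e])))) := by
  have hmem : ∀ (u : String), u ∈ pref ++ [e] ↔ (u ∈ pref ∨ u = e) := by
    intro u; simp [List.mem_append]
  unfold pvSeenStep
  by_cases hN : PySem.Str.endswith e "_XN" = true
  · rw [if_pos hN]
    have hiffN : ∀ sc : String, (sc ++ "_XN" = e) ↔ sc = PySem.Str.slice e none (some (-3)) := by
      intro sc
      rw [pvSuffix_iff sc e "_XN" (by decide)]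
      exact ⟨fun h => h.2.symm, fun h => ⟨hN, h.symm⟩⟩
    have hiffR : ∀ sc : String, ¬ (sc ++ "_XR" = e) := by
      intro sc hcon
      have hco := ((pvSuffix_iff sc e "_XR" (by decide)).mp hcon).1
      rw [pvNotBoth e hN] at hco
      exact absurd hco (by simp)
    have em2 : ∀ sc : String, ((sc ++ "_XR") ∈ pref ++ [e]) ↔ ((sc ++ "_XR") ∈ pref) := by
      intro sc
      rw [hmem]
      exact ⟨fun h => h.elim id (fun h => absurd h (hiffR sc)), Or.inl⟩
    by_cases hb : b.contains (PySem.Str.slice e none (some (-3))) = true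
    · rw [if_pos hb]
      refine ⟨?_, ?_, ?_⟩
      · rw [PySem.Dict.keys_modify]
        exact PySem.Dict.nodup_keys_insert _ _ _ h1
      · intro sc
        rw [PySem.Dict.contains_modify]
        by_cases hsb : sc = PySem.Str.slice e none (some (-3))
        · have hbeq : (sc == PySem.Str.slice e none (some (-3))) = true := by simp [hsb]
          rw [hbeq]
          have hmN : (sc ++ "_XN") ∈ pref ++ [e] := by
            rw [hmem]; exact Or.inr ((hiffN sc).mpr hsb)
          have hbc : PySem.Dict.contains b sc = true := by rw [hsb]; exact hb
          simp [hbc, hmN]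
        · have hbeq : (sc == PySem.Str.slice e none (some (-3))) = false := by simp [hsb]
          rw [hbeq]
          have em1 : ((sc ++ "_XN") ∈ pref ++ [e]) ↔ ((sc ++ "_XN") ∈ pref) := by
            rw [hmem]
            exact ⟨fun h => h.elim id (fun h => absurd ((hiffN sc).mp h) hsb), Or.inl⟩
          simp only [Bool.false_or, h2 sc, em1, em2 sc]
      · intro sc hbc
        by_cases hsb : sc = PySem.Str.slice e none (some (-3))
        · have hmN : (sc ++ "_XN") ∈ pref ++ [e] := by
            rw [hmem]; exact Or.inr ((hiffN sc).mpr hsb)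
          rw [← hsb, PySem.Dict.getD_modify_self, h3 sc hbc]
          simp [hmN, em2 sc]
        · rw [PySem.Dict.getD_modify_of_ne _ _ _ hsb, h3 sc hbc]
          have em1 : ((sc ++ "_XN") ∈ pref ++ [e]) ↔ ((sc ++ "_XN") ∈ pref) := by
            rw [hmem]
            exact ⟨fun h => h.elim id (fun h => absurd ((hiffN sc).mp h) hsb), Or.inl⟩
          simp [em1, em2 sc]
    · rw [if_neg hb]
      have hbf : b.contains (PySem.Str.slice e none (some (-3))) = false := by
        exact Bool.not_eq_true _ ▸ (by simpa using hb)
      refine ⟨h1, ?_, ?_⟩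
      · intro sc
        rw [h2 sc]
        by_cases hsb : sc = PySem.Str.slice e none (some (-3))
        · rw [hsb, hbf]; simp
        · have em1 : ((sc ++ "_XN") ∈ pref ++ [e]) ↔ ((sc ++ "_XN") ∈ pref) := by
            rw [hmem]
            exact ⟨fun h => h.elim id (fun h => absurd ((hiffN sc).mp h) hsb), Or.inl⟩
          simp only [em1, em2 sc]
      · intro sc hbc
        have hsb : sc ≠ PySem.Str.slice e none (some (-3)) := by
          intro h; rw [h] at hbc; rw [hbc] at hbf; exact absurd hbf (by simp)
        rw [h3 sc hbc]
        have em1 : ((sc ++ "_XN") ∈ pref ++ [e]) ↔ ((sc ++ "_XN") ∈ pref) := by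
          rw [hmem]
          exact ⟨fun h => h.elim id (fun h => absurd ((hiffN sc).mp h) hsb), Or.inl⟩
        simp [em1, em2 sc]
  · rw [if_neg hN]
    have hiffN : ∀ sc : String, ¬ (sc ++ "_XN" = e) := by
      intro sc hcon
      exact hN ((pvSuffix_iff sc e "_XN" (by decide)).mp hcon).1
    have em1 : ∀ sc : String, ((sc ++ "_XN") ∈ pref ++ [e]) ↔ ((sc ++ "_XN") ∈ pref) := by
      intro sc
      rw [hmem]
      exact ⟨fun h => h.elim id (fun h => absurd h (hiffN sc)), Or.inl⟩
    by_cases hRe : PySem.Str.endswith e "_XR" = true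
    · rw [if_pos hRe]
      have hiffR : ∀ sc : String, (sc ++ "_XR" = e) ↔ sc = PySem.Str.slice e none (some (-3)) := by
        intro sc
        rw [pvSuffix_iff sc e "_XR" (by decide)]
        exact ⟨fun h => h.2.symm, fun h => ⟨hRe, h.symm⟩⟩
      by_cases hb : b.contains (PySem.Str.slice e none (some (-3))) = true
      · rw [if_pos hb]
        refine ⟨?_, ?_, ?_⟩
        · rw [PySem.Dict.keys_modify]
          exact PySem.Dict.nodup_keys_insert _ _ _ h1
        · intro sc
          rw [PySem.Dict.contains_modify]
          by_cases hsb : sc = PySem.Str.slice e none (some (-3))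
          · have hbeq : (sc == PySem.Str.slice e none (some (-3))) = true := by simp [hsb]
            rw [hbeq]
            have hmR : (sc ++ "_XR") ∈ pref ++ [e] := by
              rw [hmem]; exact Or.inr ((hiffR sc).mpr hsb)
            have hbc : PySem.Dict.contains b sc = true := by rw [hsb]; exact hb
            simp [hbc, hmR]
          · have hbeq : (sc == PySem.Str.slice e none (some (-3))) = false := by simp [hsb]
            rw [hbeq]
            have em2 : ((sc ++ "_XR") ∈ pref ++ [e]) ↔ ((sc ++ "_XR") ∈ pref) := by
              rw [hmem]
              exact ⟨fun h => h.elim id (fun h => absurd ((hiffR sc).mp h) hsb), Or.inl⟩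
            simp only [Bool.false_or, h2 sc, em1 sc, em2]
        · intro sc hbc
          by_cases hsb : sc = PySem.Str.slice e none (some (-3))
          · have hmR : (sc ++ "_XR") ∈ pref ++ [e] := by
              rw [hmem]; exact Or.inr ((hiffR sc).mpr hsb)
            rw [← hsb, PySem.Dict.getD_modify_self, h3 sc hbc]
            simp [hmR, em1 sc]
          · rw [PySem.Dict.getD_modify_of_ne _ _ _ hsb, h3 sc hbc]
            have em2 : ((sc ++ "_XR") ∈ pref ++ [e]) ↔ ((sc ++ "_XR") ∈ pref) := by
              rw [hmem]
              exact ⟨fun h => h.elim id (fun h => absurd ((hiffR sc).mp h) hsb), Or.inl⟩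
            simp [em1 sc, em2]
      · rw [if_neg hb]
        have hbf : b.contains (PySem.Str.slice e none (some (-3))) = false := by
          exact Bool.not_eq_true _ ▸ (by simpa using hb)
        refine ⟨h1, ?_, ?_⟩
        · intro sc
          rw [h2 sc]
          by_cases hsb : sc = PySem.Str.slice e none (some (-3))
          · rw [hsb, hbf]; simp
          · have em2 : ((sc ++ "_XR") ∈ pref ++ [e]) ↔ ((sc ++ "_XR") ∈ pref) := by
              rw [hmem]
              exact ⟨fun h => h.elim id (fun h => absurd ((hiffR sc).mp h) hsb), Or.inl⟩
            simp only [em1 sc, em2]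
        · intro sc hbc
          have hsb : sc ≠ PySem.Str.slice e none (some (-3)) := by
            intro h; rw [h] at hbc; rw [hbc] at hbf; exact absurd hbf (by simp)
          rw [h3 sc hbc]
          have em2 : ((sc ++ "_XR") ∈ pref ++ [e]) ↔ ((sc ++ "_XR") ∈ pref) := by
            rw [hmem]
            exact ⟨fun h => h.elim id (fun h => absurd ((hiffR sc).mp h) hsb), Or.inl⟩
          simp [em1 sc, em2]
    · rw [if_neg hRe]
      have hiffR : ∀ sc : String, ¬ (sc ++ "_XR" = e) := by
        intro sc hcon
        exact hRe ((pvSuffix_iff sc e "_XR" (by decide)).mp hcon).1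
      have em2 : ∀ sc : String, ((sc ++ "_XR") ∈ pref ++ [e]) ↔ ((sc ++ "_XR") ∈ pref) := by
        intro sc
        rw [hmem]
        exact ⟨fun h => h.elim id (fun h => absurd h (hiffR sc)), Or.inl⟩
      refine ⟨h1, ?_, ?_⟩
      · intro sc
        rw [h2 sc]
        simp only [em1 sc, em2 sc]
      · intro sc hbc
        rw [h3 sc hbc]
        simp [em1 sc, em2 sc]

lemma pvSeenFold (b : pvOuter) :
    ∀ (es : List String) (s : PySem.Dict String (Bool × Bool)) (pref : List String),
    s.keys.Nodup →
    (∀ sc, s.contains sc = (b.contains sc && decide ((sc ++ "_XN") ∈ pref ∨ (sc ++ "_XR") ∈ pref))) →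
    (∀ sc, b.contains sc = true → s.getD sc (false, false) = (decide ((sc ++ "_XN") ∈ pref), decide ((sc ++ "_XR") ∈ pref))) →
    ((es.foldl (pvSeenStep b) s).keys.Nodup ∧
     (∀ sc, (es.foldl (pvSeenStep b) s).contains sc = (b.contains sc && decide ((sc ++ "_XN") ∈ pref ++ es ∨ (sc ++ "_XR") ∈ pref ++ es))) ∧
     (∀ sc, b.contains sc = true → (es.foldl (pvSeenStep b) s).getD sc (false, false) = (decide ((sc ++ "_XN") ∈ pref ++ es), decide ((sc ++ "_XR") ∈ pref ++ es)))) := by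
  intro es
  induction es with
  | nil =>
    intro s pref h1 h2 h3
    simp only [List.foldl_nil, List.append_nil]
    exact ⟨h1, h2, h3⟩
  | cons e es ih =>
    intro s pref h1 h2 h3
    simp only [List.foldl_cons]
    obtain ⟨g1, g2, g3⟩ := pvSeenStep_spec b s pref e h1 h2 h3
    have hassoc : pref ++ e :: es = (pref ++ [e]) ++ es := by simp
    rw [hassoc]
    exact ih (pvSeenStep b s e) (pref ++ [e]) g1 g2 g3

lemma pvSeen_spec (b : pvOuter) (r : pvRoute) :
    (pvSeen b r).keys.Nodup ∧
    (∀ sc, (pvSeen b r).contains sc = (b.contains sc && pvMatches sc r)) ∧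
    (∀ sc, b.contains sc = true →
      (pvSeen b r).getD sc (false, false) = (decide ((sc ++ "_XN") ∈ pvRSC r), decide ((sc ++ "_XR") ∈ pvRSC r))) := by
  obtain ⟨f1, f2, f3⟩ := pvSeenFold b (pvRSC r) PySem.Dict.empty []
    (by rw [PySem.Dict.keys_empty]; exact List.nodup_nil)
    (by intro sc; rw [PySem.Dict.contains_empty]; simp)
    (by intro sc _; rw [PySem.Dict.getD_empty]; simp)
  simp only [List.nil_append] at f2 f3
  unfold pvSeen
  refine ⟨f1, ?_, f3⟩
  intro sc
  rw [f2 sc]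
  simp [pvMatches, pvRSC_eq]

lemma pvBApply_eq (rname sc : String) (fl : Bool × Bool) (b : pvOuter) (d0 : pvInner)
    (hR : d0.contains "Routes" = false) (hP : d0.contains "Position" = false)
    (pre : List (String × String))
    (hb : b.get? sc = some (pvUpd d0 pre))
    (hfl : fl.1 = true ∨ fl.2 = true) :
    pvBApply rname b (sc, fl) = b.insert sc (pvUpd d0 (pre ++
      ((if fl.1 = true then [(rname, "N")] else []) ++ (if fl.2 = true then [(rname, "R")] else [])))) := by
  obtain ⟨f1, f2⟩ := fl
  unfold pvBApply
  dsimp only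
  rw [PySem.Dict.getD_of_get?_eq_some _ _ hb]
  cases f1 <;> cases f2
  · simp at hfl
  · simp only [Bool.false_eq_true, if_false, if_true]
    rw [pvIf_getD_R d0 hR hP pre, pvIf_getD_P d0 hR hP pre]
    rw [pvUpd_step d0 hR hP pre rname "R"]
    simp
  · simp only [if_true, Bool.false_eq_true, if_false]
    rw [pvIf_getD_R d0 hR hP pre, pvIf_getD_P d0 hR hP pre]
    rw [pvUpd_step d0 hR hP pre rname "N"]
    simp
  · simp only [if_true]
    rw [pvIf_getD_R d0 hR hP pre, pvIf_getD_P d0 hR hP pre]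
    rw [pvUpd_step d0 hR hP pre rname "N"]
    rw [pvUpd_append d0 hR hP (pre ++ [(rname, "N")]) (by simp) rname "R"]
    simp

lemma pvBStep_eq (scid : pvOuter) (hnd : scid.keys.Nodup)
    (hsh : ∀ p ∈ scid.items, ∃ nb, p.2 = PySem.Dict.mk [("Neighbour", nb)])
    (done : List pvRoute) (r : pvRoute) (b : pvOuter)
    (hb : b.items = scid.items.map (fun p => (p.1, pvUpd p.2 (done.flatMap (pvContrib p.1))))) :
    (pvBStep b r).items = scid.items.map (fun p => (p.1, pvUpd p.2 ((done ++ [r]).flatMap (pvContrib p.1)))) := by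
  have hkeys : b.keys = scid.keys := by
    simp only [PySem.Dict.keys, hb, List.map_map]
    apply List.map_congr_left
    intro p _
    rfl
  have hndb : b.keys.Nodup := by rw [hkeys]; exact hnd
  have hcontb : ∀ x, b.contains x = scid.contains x := by
    intro x
    rw [PySem.Dict.contains_eq_decide_mem_keys, PySem.Dict.contains_eq_decide_mem_keys, hkeys]
  obtain ⟨hsnd, hscont, hsflags⟩ := pvSeen_spec b r
  have hkeyseen : (pvSeen b r).items.map Prod.fst = (pvSeen b r).keys := by
    simp only [PySem.Dict.keys]
  have hstep : ∀ a ∈ (pvSeen b r).items, ∀ b' : pvOuter, b'.keys.Nodup →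
      b'.get? a.1 = b.get? a.1 →
      pvBApply ("R" ++ r.1) b' a = b'.insert a.1
        (pvUpd (scid.getD a.1 PySem.Dict.empty) ((done ++ [r]).flatMap (pvContrib a.1))) := by
    intro a ha b' hndb' hgb'
    have hmemk : a.1 ∈ (pvSeen b r).keys := by rw [← hkeyseen]; exact List.mem_map_of_mem ha
    have hsc := (PySem.Dict.contains_iff_mem_keys _ _).mpr hmemk
    rw [hscont a.1] at hsc
    obtain ⟨hbc, hmdec⟩ := Bool.and_eq_true_iff.mp hsc
    have hmm := (pvMatches_iff a.1 r).mp hmdec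
    have hscidc : scid.contains a.1 = true := by rw [← hcontb]; exact hbc
    obtain ⟨q, hq, hqf⟩ := List.mem_map.mp ((PySem.Dict.contains_iff_mem_keys _ _).mp hscidc)
    have hbitem : (a.1, pvUpd q.2 (done.flatMap (pvContrib a.1))) ∈ b.items := by
      rw [hb]
      refine List.mem_map.mpr ⟨q, hq, ?_⟩
      show (q.1, pvUpd q.2 (done.flatMap (pvContrib q.1))) = _
      rw [hqf]
    have hbget : b.get? a.1 = some (pvUpd q.2 (done.flatMap (pvContrib a.1))) :=
      PySem.Dict.get?_of_mem_items _ hbitem hndb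
    obtain ⟨nb, hnb⟩ := hsh q hq
    have hRc : q.2.contains "Routes" = false := by rw [hnb]; simp [PySem.Dict.contains_mk]
    have hPc : q.2.contains "Position" = false := by rw [hnb]; simp [PySem.Dict.contains_mk]
    have hitem : (a.1, a.2) ∈ (pvSeen b r).items := ha
    have hflag : a.2 = (decide ((a.1 ++ "_XN") ∈ pvRSC r), decide ((a.1 ++ "_XR") ∈ pvRSC r)) := by
      have hg := PySem.Dict.getD_of_mem_items (pvSeen b r) hitem hsnd (false, false)
      rw [hsflags a.1 hbc] at hg
      exact hg.symm
    have hfl : a.2.1 = true ∨ a.2.2 = true := by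
      rcases hmm with h | h
      · left; rw [hflag]; simpa using h
      · right; rw [hflag]; simpa using h
    have hgoal := pvBApply_eq ("R" ++ r.1) a.1 a.2 b' q.2 hRc hPc
      (done.flatMap (pvContrib a.1)) (by rw [hgb', hbget]) hfl
    have hcr : (if a.2.1 = true then [("R" ++ r.1, "N")] else []) ++ (if a.2.2 = true then [("R" ++ r.1, "R")] else []) = pvContrib a.1 r := by
      rw [hflag]
      unfold pvContrib
      by_cases hx : (a.1 ++ "_XN") ∈ pvRSC r <;> by_cases hy : (a.1 ++ "_XR") ∈ pvRSC r <;> simp [hx, hy]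
    rw [hcr] at hgoal
    have hgetd : scid.getD a.1 PySem.Dict.empty = q.2 := by
      rw [← hqf]
      exact PySem.Dict.getD_of_mem_items _ hq hnd _
    rw [hgetd]
    have hfm : (done ++ [r]).flatMap (pvContrib a.1) = done.flatMap (pvContrib a.1) ++ pvContrib a.1 r := by
      simp
    rw [hfm]
    exact hgoal
  unfold pvBStep
  rw [pvFoldl_insert_items Prod.fst
      (fun k => pvUpd (scid.getD k PySem.Dict.empty) ((done ++ [r]).flatMap (pvContrib k)))
      (pvSeen b r).items (pvBApply ("R" ++ r.1)) b (by rw [hkeyseen]; exact hsnd) hndb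
      (fun a ha => by
        have hmemk : a.1 ∈ (pvSeen b r).keys := by rw [← hkeyseen]; exact List.mem_map_of_mem ha
        have hsc := (PySem.Dict.contains_iff_mem_keys _ _).mpr hmemk
        rw [hscont a.1] at hsc
        exact (Bool.and_eq_true_iff.mp hsc).1) hstep]
  rw [hb, List.map_map]
  apply List.map_congr_left
  intro p hp
  by_cases hmemp : p.1 ∈ (pvSeen b r).items.map Prod.fst
  · simp only [Function.comp_apply, hmemp, if_pos]
    rw [PySem.Dict.getD_of_mem_items _ hp hnd]
  · simp only [Function.comp_apply, hmemp, if_neg, if_false]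
    have hpc : scid.contains p.1 = true := by
      rw [PySem.Dict.contains_iff_mem_keys]
      exact List.mem_map_of_mem hp
    have hbc : b.contains p.1 = true := by rw [hcontb]; exact hpc
    have hnm : ¬ pvMatches p.1 r = true := by
      intro hm
      have hcc : (pvSeen b r).contains p.1 = true := by
        rw [hscont]; simp [hbc, hm]
      have := (PySem.Dict.contains_iff_mem_keys _ _).mp hcc
      rw [← hkeyseen] at this
      exact hmemp this
    have hx : ¬ (p.1 ++ "_XN") ∈ pvRSC r := fun h => hnm ((pvMatches_iff p.1 r).mpr (Or.inl h))
    have hy : ¬ (p.1 ++ "_XR") ∈ pvRSC r := fun h => hnm ((pvMatches_iff p.1 r).mpr (Or.inr h))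
    have hcr : pvContrib p.1 r = [] := by simp [pvContrib, hx, hy]
    simp [hcr]

lemma pvFoldB (scid : pvOuter) (hnd : scid.keys.Nodup)
    (hsh : ∀ p ∈ scid.items, ∃ nb, p.2 = PySem.Dict.mk [("Neighbour", nb)]) :
    ∀ (rs : List pvRoute) (done : List pvRoute) (b : pvOuter),
    b.items = scid.items.map (fun p => (p.1, pvUpd p.2 (done.flatMap (pvContrib p.1)))) →
    (rs.foldl pvBStep b).items = scid.items.map (fun p => (p.1, pvUpd p.2 ((done ++ rs).flatMap (pvContrib p.1)))) := by
  intro rs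
  induction rs with
  | nil =>
    intro done b hb
    simpa using hb
  | cons r rs ih =>
    intro done b hb
    simp only [List.foldl_cons]
    have hstep := pvBStep_eq scid hnd hsh done r b hb
    have := ih (done ++ [r]) (pvBStep b r) hstep
    rw [this]
    have hassoc : (done ++ [r]) ++ rs = done ++ r :: rs := by simp
    rw [hassoc]

lemma pvB_eq_target (network routes : List pvRoute) :
    getScissorCrossing_alt network routes = pvTarget network routes := by
  obtain ⟨hnd, hsh, _⟩ := pvPhase1_spec network
  unfold getScissorCrossing_alt pvTarget
  dsimp only
  have h0 : (pvNeighbours network).items = (pvNeighbours network).items.map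
      (fun p => (p.1, pvUpd p.2 (([] : List pvRoute).flatMap (pvContrib p.1)))) := by
    simp [pvUpd]
  rw [pvFoldB (pvNeighbours network) hnd hsh routes [] (pvNeighbours network) h0]
  rw [List.map_map]
  apply List.map_congr_left
  intro p hp
  simp

-- ===== tightness: A ≠ B everywhere inside D_ =====

lemma pvMentions_matches (sc : String) (r : pvRoute)
    (h : ∃ sfx ∈ ["_XN", "_XR"], sc ++ sfx ∈ (pvLookup? "ScissorCrossings" r.2).getD []) :
    pvMatches sc r = true := by
  obtain ⟨sfx, hsfx, hm⟩ := h
  rw [pvRSC_eq] at hm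
  rcases (by simpa using hsfx : sfx = "_XN" ∨ sfx = "_XR") with h | h
  · subst h; exact (pvMatches_iff sc r).mpr (Or.inl hm)
  · subst h; exact (pvMatches_iff sc r).mpr (Or.inr hm)

lemma pvContrib_len (sc : String) (r : pvRoute) (h : pvMatches sc r = true) :
    1 ≤ (pvContrib sc r).length := by
  rcases (pvMatches_iff sc r).mp h with h | h <;> simp [pvContrib, h] <;> omega

lemma pvContrib_mem_fst (sc : String) (r : pvRoute) (h : pvMatches sc r = true) :
    "R" ++ r.1 ∈ (pvContrib sc r).map Prod.fst := by
  rcases (pvMatches_iff sc r).mp h with h | h <;> simp [pvContrib, h]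

-- phase-1 completeness: every listed crossing becomes a key
lemma pvNbAdd_contains (x sc k : String) (acc : pvOuter)
    (h : acc.contains k = true ∨ k = sc) : (pvNbAdd x acc sc).contains k = true := by
  unfold pvNbAdd
  dsimp only
  by_cases hc : acc.contains sc = true
  · rw [if_pos hc]
    split
    · rcases h with h | h
      · exact h
      · subst h; exact hc
    · rw [PySem.Dict.contains_insert]
      rcases h with h | h
      · simp [h]
      · simp [h]
  · rw [if_neg hc]
    split
    · rw [PySem.Dict.contains_insert]
      rcases h with h | h
      · simp [h]
      · simp [h]
    · rw [PySem.Dict.contains_insert, PySem.Dict.contains_insert]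
      rcases h with h | h
      · simp [h]
      · simp [h]

lemma pvNbFold_contains (x k : String) :
    ∀ (scs : List String) (acc : pvOuter),
    (acc.contains k = true ∨ k ∈ scs) → (scs.foldl (pvNbAdd x) acc).contains k = true := by
  intro scs
  induction scs with
  | nil =>
    intro acc h
    rcases h with h | h
    · exact h
    · simp at h
  | cons sc scs ih =>
    intro acc h
    simp only [List.foldl_cons]
    by_cases hk : k = sc
    · exact ih _ (Or.inl (pvNbAdd_contains x sc k acc (Or.inr hk)))
    · rcases h with h | h
      · exact ih _ (Or.inl (pvNbAdd_contains x sc k acc (Or.inl h)))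
      · rcases List.mem_cons.mp h with h' | h'
        · exact absurd h' hk
        · exact ih _ (Or.inr h')

lemma pvPhase1_complete_fold (k : String) :
    ∀ (net : List pvRoute) (acc : pvOuter),
    (acc.contains k = true ∨ k ∈ pvCrossList net) →
    (net.foldl (fun acc e =>
        let ed : pvInner := PySem.Dict.mk e.2
        if ed.contains "Crossing" then (ed.getD "Crossing" []).foldl (pvNbAdd e.1) acc else acc) acc).contains k = true := by
  intro net
  induction net with
  | nil =>
    intro acc h
    rcases h with h | h
    · exact h
    · simp [pvCrossList] at h
  | cons e net ih =>
    intro acc h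
    simp only [List.foldl_cons]
    have hcl : pvCrossList (e :: net) =
        (if (PySem.Dict.mk e.2 : pvInner).contains "Crossing" = true then (PySem.Dict.mk e.2 : pvInner).getD "Crossing" [] else []) ++ pvCrossList net := by
      rw [pvCrossList, List.flatMap_cons, ← pvCrossEntry_eq]
      rfl
    by_cases hc : (PySem.Dict.mk e.2 : pvInner).contains "Crossing" = true
    · simp only [hc, if_true]
      rcases h with h | h
      · exact ih _ (Or.inl (pvNbFold_contains e.1 k _ acc (Or.inl h)))
      · rw [hcl, if_pos hc, List.mem_append] at h
        rcases h with h | h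
        · exact ih _ (Or.inl (pvNbFold_contains e.1 k _ acc (Or.inr h)))
        · exact ih _ (Or.inr h)
    · simp only [hc, Bool.false_eq_true, if_false]
      rcases h with h | h
      · exact ih _ (Or.inl h)
      · rw [hcl, if_neg hc, List.nil_append] at h
        exact ih _ (Or.inr h)

lemma pvKeys_complete (network : List pvRoute) (k : String) (h : k ∈ pvCrossList network) :
    (pvNeighbours network).contains k = true :=
  pvPhase1_complete_fold k network PySem.Dict.empty (Or.inr h)

-- length bounds for the skip-aware fold
lemma pvLenLe (sc : String) :
    ∀ (rs : List pvRoute) (l : List (String × String)),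
    (rs.foldl (pvStepL sc) l).length ≤ l.length + (rs.flatMap (pvContrib sc)).length := by
  intro rs
  induction rs with
  | nil =>
    intro l
    simp
  | cons r rs ih =>
    intro l
    simp only [List.foldl_cons, List.flatMap_cons, List.length_append]
    by_cases hskip : r.1 ∈ l.map Prod.fst ∧ pvMatches sc r = true
    · rw [show pvStepL sc l r = l from by unfold pvStepL; rw [if_pos hskip]]
      have := ih l
      omega
    · rw [show pvStepL sc l r = l ++ pvContrib sc r from by unfold pvStepL; rw [if_neg hskip]]
      have := ih (l ++ pvContrib sc r)
      simp only [List.length_append] at this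
      omega

def pvSkipCond (sc : String) (rs : List pvRoute) (l : List (String × String)) : Prop :=
  (∃ i : Fin rs.length, ∃ j : Fin rs.length, i < j ∧
      pvMatches sc rs[i] = true ∧ pvMatches sc rs[j] = true ∧ (rs[j]).1 = "R" ++ (rs[i]).1) ∨
  (∃ r ∈ rs, pvMatches sc r = true ∧ r.1 ∈ l.map Prod.fst)

lemma pvLenLt (sc : String) :
    ∀ (rs : List pvRoute) (l : List (String × String)), pvSkipCond sc rs l →
    (rs.foldl (pvStepL sc) l).length < l.length + (rs.flatMap (pvContrib sc)).length := by
  intro rs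
  induction rs with
  | nil =>
    intro l h
    rcases h with ⟨i, _, _⟩ | ⟨r, hr, _⟩
    · exact absurd i.isLt (by simp)
    · simp at hr
  | cons r rs ih =>
    intro l h
    simp only [List.foldl_cons, List.flatMap_cons, List.length_append]
    by_cases hskip : r.1 ∈ l.map Prod.fst ∧ pvMatches sc r = true
    · have hstep : pvStepL sc l r = l := by unfold pvStepL; rw [if_pos hskip]
      rw [hstep]
      have h1 := pvLenLe sc rs l
      have h2 := pvContrib_len sc r hskip.2
      omega
    · have hstep : pvStepL sc l r = l ++ pvContrib sc r := by unfold pvStepL; rw [if_neg hskip]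
      rw [hstep]
      have hcond : pvSkipCond sc rs (l ++ pvContrib sc r) := by
        rcases h with ⟨i, j, hij, hm1, hm2, hname⟩ | ⟨r', hr', hm', hmem'⟩
        · rcases i with ⟨iv, hi⟩
          rcases j with ⟨jv, hj⟩
          cases iv with
          | zero =>
            have hm1' : pvMatches sc r = true := by simpa using hm1
            cases jv with
            | zero => simp only [Fin.lt_def] at hij; omega
            | succ jv' =>
              right
              have hj' : jv' < rs.length := by simpa using hj
              refine ⟨rs[jv'], List.getElem_mem hj', ?_, ?_⟩
              · simpa using hm2
              · have hname' : (rs[jv']).1 = "R" ++ r.1 := by simpa using hname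
                rw [hname', List.map_append, List.mem_append]
                exact Or.inr (pvContrib_mem_fst sc r hm1')
          | succ iv' =>
            cases jv with
            | zero => simp only [Fin.lt_def] at hij; omega
            | succ jv' =>
              left
              have hi' : iv' < rs.length := by simpa using hi
              have hj' : jv' < rs.length := by simpa using hj
              refine ⟨⟨iv', hi'⟩, ⟨jv', hj'⟩, ?_, ?_, ?_, ?_⟩
              · have := hij
                simp only [Fin.lt_def] at this ⊢
                omega
              · simpa using hm1
              · simpa using hm2
              · simpa using hname
        · rcases List.mem_cons.mp hr' with h' | h'
          · exact absurd ⟨h' ▸ hmem', h' ▸ hm'⟩ hskip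
          · right
            refine ⟨r', h', hm', ?_⟩
            rw [List.map_append, List.mem_append]
            exact Or.inl hmem'
      have := ih (l ++ pvContrib sc r) hcond
      simp only [List.length_append] at this
      omega

-- ===== VERDICT (by name: the statement is the Claim_ definition above) =====
theorem getScissorCrossing_spec : Claim_unchanged_getScissorCrossing := by
  intro network routes _ _ hD
  rw [pvA_eq_target network routes hD, pvB_eq_target network routes]

theorem getScissorCrossing_changed : Claim_changed_getScissorCrossing := by
  unfold Claim_changed_getScissorCrossing; decide

theorem getScissorCrossing_tight : Claim_exact_getScissorCrossing := by
  intro network routes _ _ hD heq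
  obtain ⟨sc, hscc, i, j, hij, hmi, hmj, hname⟩ := hD
  have hmi' : pvMatches sc routes[i] = true := pvMentions_matches sc _ hmi
  have hmj' : pvMatches sc routes[j] = true := pvMentions_matches sc _ hmj
  obtain ⟨hnd, hsh, _⟩ := pvPhase1_spec network
  have hcont := pvKeys_complete network sc hscc
  obtain ⟨p, hp, hfst⟩ := List.mem_map.mp ((PySem.Dict.contains_iff_mem_keys _ _).mp hcont)
  rw [pvA_char network routes, pvB_eq_target network routes] at heq
  unfold pvTarget at heq
  have hpt := (List.map_inj_left.mp heq) p hp
  have hitems : (pvUpd p.2 (routes.foldl (pvStepL p.1) [])).items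
      = (pvUpd p.2 (routes.flatMap (pvContrib p.1))).items := congrArg Prod.snd hpt
  obtain ⟨nb, hnb⟩ := hsh p hp
  have hR : p.2.contains "Routes" = false := by rw [hnb]; simp [PySem.Dict.contains_mk]
  have hP : p.2.contains "Position" = false := by rw [hnb]; simp [PySem.Dict.contains_mk]
  have hlt : (routes.foldl (pvStepL p.1) []).length < (routes.flatMap (pvContrib p.1)).length := by
    have := pvLenLt p.1 routes []
      (Or.inl ⟨i, j, hij, by rw [hfst]; exact hmi', by rw [hfst]; exact hmj', hname⟩)
    simpa using this
  set LA := routes.foldl (pvStepL p.1) [] with hLA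
  set LB := routes.flatMap (pvContrib p.1) with hLB
  have hBne : LB ≠ [] := by
    intro h
    rw [h] at hlt
    simp at hlt
  by_cases hAne : LA = []
  · rw [hAne, pvUpd_nil, pvUpd_cons p.2 LB hBne, pvItems_RP p.2 hR hP] at hitems
    have := congrArg List.length hitems
    simp at this
  · rw [pvUpd_cons p.2 LA hAne, pvUpd_cons p.2 LB hBne,
        pvItems_RP p.2 hR hP, pvItems_RP p.2 hR hP] at hitems
    have h2 := List.append_cancel_left hitems
    have h3 : LA.map Prod.fst = LB.map Prod.fst := by
      have := List.head_eq_of_cons_eq h2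
      exact (Prod.ext_iff.mp this).2
    have := congrArg List.length h3
    simp only [List.length_map] at this
    omega
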